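-- pv_equiv track=rewrite | github.com/hzjian123/TL_eval | src/tf_compare.py | match_bboxs
-- ===== SOURCE A (Python) =====
-- def match_bboxs(label_bboxs, infer_bboxs, thres = 4):
--     count = 0
--     for bbox in infer_bboxs:
--         x = bbox[0]
--         y = bbox[1]
--         width = bbox[2]
--         height = bbox[3]
--         for label_bbox in label_bboxs:
--             x_real = label_bbox[0]
--             y_real = label_bbox[1]
--             width_real = label_bbox[2]
--             height_real = label_bbox[3]
--             if abs(x_real - x) > thres:
--                 continue
--             if abs(y_real - y) > thres:
--                 continue
--             if abs(width_real - width) > thres: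
--                 continue
--             if abs(height_real - height) > thres:
--                 continue
--             count += 1
--     return count
-- ===== SOURCE B (Python) =====
-- def _bisect_left(keys, x):
--     lo, hi = 0, len(keys)
--     while lo < hi:
--         mid = (lo + hi) // 2
--         if keys[mid] < x:
--             lo = mid + 1
--         else:
--             hi = mid
--     return lo
--
--
-- def _bisect_right(keys, x):
--     lo, hi = 0, len(keys)
--     while lo < hi:
--         mid = (lo + hi) // 2
--         if x < keys[mid]:
--             hi = mid
--         else:
--             lo = mid + 1
--     return lo
--
--
-- def match_bboxs(label_bboxs, infer_bboxs, thres=4):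
--     labels = sorted(label_bboxs, key=lambda b: b[0])
--     keys = [b[0] for b in labels]
--     count = 0
--     for bbox in infer_bboxs:
--         x, y, width, height = bbox[0], bbox[1], bbox[2], bbox[3]
--         lo = _bisect_left(keys, x - thres)
--         hi = _bisect_right(keys, x + thres)
--         for lb in labels[lo:hi]:
--             if abs(lb[1] - y) <= thres and abs(lb[2] - width) <= thres and abs(lb[3] - height) <= thres:
--                 count += 1
--     return count
-- ===== Notes on version B (the rewrite author's own statement) =====
-- stated objective: faster
-- what changed: Replaces the exhaustive all-pairs scan with a copy of label_bboxs sorted by x plus a hand-rolled binary search: for each infer bbox only the labels whose x lies in [x-thres, x+thres] are examined.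
import Mathlib
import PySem

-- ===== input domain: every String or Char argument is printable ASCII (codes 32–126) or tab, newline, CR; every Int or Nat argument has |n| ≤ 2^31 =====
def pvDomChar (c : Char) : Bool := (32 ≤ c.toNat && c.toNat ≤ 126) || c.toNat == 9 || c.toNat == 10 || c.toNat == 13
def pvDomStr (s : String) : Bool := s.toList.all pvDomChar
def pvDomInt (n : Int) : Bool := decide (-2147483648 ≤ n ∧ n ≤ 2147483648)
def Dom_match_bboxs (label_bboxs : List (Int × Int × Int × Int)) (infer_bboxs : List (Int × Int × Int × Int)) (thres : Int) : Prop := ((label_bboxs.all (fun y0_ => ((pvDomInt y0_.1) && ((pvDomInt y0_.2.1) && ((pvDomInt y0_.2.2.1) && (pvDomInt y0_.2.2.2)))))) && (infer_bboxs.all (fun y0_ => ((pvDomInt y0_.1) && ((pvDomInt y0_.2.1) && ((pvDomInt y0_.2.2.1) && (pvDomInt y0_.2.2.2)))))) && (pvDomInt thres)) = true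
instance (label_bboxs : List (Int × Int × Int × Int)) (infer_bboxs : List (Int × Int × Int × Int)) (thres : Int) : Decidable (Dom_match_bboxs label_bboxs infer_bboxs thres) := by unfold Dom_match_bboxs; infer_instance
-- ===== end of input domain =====

-- B replaces A's exhaustive all-pairs scan by a copy of label_bboxs sorted on x plus a
-- hand-written binary search that narrows each infer bbox's candidates to the labels whose
-- x lies in [x - thres, x + thres] (objective: faster on sparse data; A is untouched, no mutation).

-- ===== PORT A =====
def match_bboxs (label_bboxs : List (Int × Int × Int × Int)) (infer_bboxs : List (Int × Int × Int × Int)) (thres : Int) : Int :=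
  infer_bboxs.foldl (fun count bbox =>
    let x := bbox.1
    let y := bbox.2.1
    let width := bbox.2.2.1
    let height := bbox.2.2.2
    label_bboxs.foldl (fun c label_bbox =>
      let x_real := label_bbox.1
      let y_real := label_bbox.2.1
      let width_real := label_bbox.2.2.1
      let height_real := label_bbox.2.2.2
      if |x_real - x| > thres then c
      else if |y_real - y| > thres then c
      else if |width_real - width| > thres then c
      else if |height_real - height| > thres then c
      else c + 1) count) 0

-- ===== PORT B =====
-- while-loop of Source B's _bisect_left as structural recursion on hi - lo;
-- keys[mid] is ported as getD (exact: every reached mid satisfies lo ≤ mid < hi ≤ keys.length)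
def pvBlLoop (keys : List Int) (x : Int) (lo hi : Nat) : Nat :=
  if _h : lo < hi then
    let mid := (lo + hi) / 2
    if keys.getD mid 0 < x then pvBlLoop keys x (mid + 1) hi
    else pvBlLoop keys x lo mid
  else lo
termination_by hi - lo
decreasing_by all_goals omega

-- while-loop of Source B's _bisect_right, same correspondence
def pvBrLoop (keys : List Int) (x : Int) (lo hi : Nat) : Nat :=
  if _h : lo < hi then
    let mid := (lo + hi) / 2
    if x < keys.getD mid 0 then pvBrLoop keys x lo mid
    else pvBrLoop keys x (mid + 1) hi
  else lo
termination_by hi - lo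
decreasing_by all_goals omega

def pvBisectLeft (keys : List Int) (x : Int) : Nat := pvBlLoop keys x 0 keys.length

def pvBisectRight (keys : List Int) (x : Int) : Nat := pvBrLoop keys x 0 keys.length

def match_bboxs_alt (label_bboxs : List (Int × Int × Int × Int)) (infer_bboxs : List (Int × Int × Int × Int)) (thres : Int) : Int :=
  let labels := PySem.List.sorted label_bboxs (fun b => b.1) false
  let keys := labels.map (fun b => b.1)
  infer_bboxs.foldl (fun count bbox =>
    let x := bbox.1
    let y := bbox.2.1
    let width := bbox.2.2.1
    let height := bbox.2.2.2
    let lo := pvBisectLeft keys (x - thres)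
    let hi := pvBisectRight keys (x + thres)
    (PySem.List.slice labels (some (lo : Int)) (some (hi : Int))).foldl (fun c lb =>
      if |lb.2.1 - y| ≤ thres ∧ |lb.2.2.1 - width| ≤ thres ∧ |lb.2.2.2 - height| ≤ thres then c + 1
      else c) count) 0

-- ===== PRECONDITION & SPEC =====
def Spec_match_bboxs (label_bboxs : List (Int × Int × Int × Int)) (infer_bboxs : List (Int × Int × Int × Int)) (thres : Int) (out : Int) : Prop := out = match_bboxs_alt label_bboxs infer_bboxs thres
instance (label_bboxs : List (Int × Int × Int × Int)) (infer_bboxs : List (Int × Int × Int × Int)) (thres : Int) (out : Int) : Decidable (Spec_match_bboxs label_bboxs infer_bboxs thres out) := by unfold Spec_match_bboxs; infer_instance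

-- ===== CLAIM (what is proved, stated in full; the proofs are below) =====
def Claim_equal_match_bboxs : Prop := ∀ (label_bboxs : List (Int × Int × Int × Int)) (infer_bboxs : List (Int × Int × Int × Int)) (thres : Int), Dom_match_bboxs label_bboxs infer_bboxs thres → Spec_match_bboxs label_bboxs infer_bboxs thres (match_bboxs label_bboxs infer_bboxs thres)

-- ===== LEMMAS AND PROOFS =====

-- the y/width/height part of the match predicate (B's inner test)
def pvRest (t : Int) (b l : Int × Int × Int × Int) : Bool :=
  decide (|l.2.1 - b.2.1| ≤ t) && decide (|l.2.2.1 - b.2.2.1| ≤ t) && decide (|l.2.2.2 - b.2.2.2| ≤ t)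

-- the full 4-coordinate match predicate (A's inner test)
def pvFull (t : Int) (b l : Int × Int × Int × Int) : Bool :=
  decide (|l.1 - b.1| ≤ t) && pvRest t b l


lemma pvBlLoop_stop (keys : List Int) (x : Int) (lo hi : Nat) (h : ¬ lo < hi) :
    pvBlLoop keys x lo hi = lo := by
  rw [pvBlLoop]; simp [h]

lemma pvBlLoop_step (keys : List Int) (x : Int) (lo hi : Nat) (h : lo < hi) :
    pvBlLoop keys x lo hi =
      if keys.getD ((lo + hi) / 2) 0 < x then pvBlLoop keys x ((lo + hi) / 2 + 1) hi
      else pvBlLoop keys x lo ((lo + hi) / 2) := by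
  rw [pvBlLoop]; simp [h]

lemma pvBrLoop_stop (keys : List Int) (x : Int) (lo hi : Nat) (h : ¬ lo < hi) :
    pvBrLoop keys x lo hi = lo := by
  rw [pvBrLoop]; simp [h]

lemma pvBrLoop_step (keys : List Int) (x : Int) (lo hi : Nat) (h : lo < hi) :
    pvBrLoop keys x lo hi =
      if x < keys.getD ((lo + hi) / 2) 0 then pvBrLoop keys x lo ((lo + hi) / 2)
      else pvBrLoop keys x ((lo + hi) / 2 + 1) hi := by
  rw [pvBrLoop]; simp [h]

lemma pvBlLoop_spec (keys : List Int) (x : Int) (hpw : keys.Pairwise (· ≤ ·)) :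
    ∀ (d lo hi : Nat), hi - lo ≤ d → hi ≤ keys.length →
      (∀ (j : Nat) (hj : j < keys.length), j < lo → keys[j] < x) →
      (∀ (j : Nat) (hj : j < keys.length), hi ≤ j → x ≤ keys[j]) →
      (∀ (j : Nat) (hj : j < keys.length), j < pvBlLoop keys x lo hi → keys[j] < x) ∧
      (∀ (j : Nat) (hj : j < keys.length), pvBlLoop keys x lo hi ≤ j → x ≤ keys[j]) := by
  have hmono : ∀ (i j : Nat) (hi' : i < keys.length) (hj' : j < keys.length), i ≤ j →
      keys[i] ≤ keys[j] := by
    intro i j hi' hj' hij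
    rcases Nat.lt_or_ge i j with h | h
    · exact List.pairwise_iff_getElem.mp hpw i j hi' hj' h
    · have : i = j := by omega
      subst this; exact le_rfl
  intro d
  induction d with
  | zero =>
    intro lo hi hd hlen h1 h2
    rw [pvBlLoop_stop keys x lo hi (by omega)]
    exact ⟨h1, fun j hj hle => h2 j hj (by omega)⟩
  | succ d ih =>
    intro lo hi hd hlen h1 h2
    by_cases hlt : lo < hi
    · rw [pvBlLoop_step keys x lo hi hlt]
      have hmidlt : (lo + hi) / 2 < keys.length := by omega
      rw [List.getD_eq_getElem keys 0 hmidlt]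
      by_cases hcase : keys[(lo + hi) / 2] < x
      · rw [if_pos hcase]
        apply ih ((lo + hi) / 2 + 1) hi (by omega) hlen
        · intro j hj hjlt
          have hle : j ≤ (lo + hi) / 2 := by omega
          exact lt_of_le_of_lt (hmono j ((lo + hi) / 2) hj hmidlt hle) hcase
        · exact h2
      · rw [if_neg hcase]
        apply ih lo ((lo + hi) / 2) (by omega) (by omega) h1
        intro j hj hle
        exact le_trans (not_lt.mp hcase) (hmono ((lo + hi) / 2) j hmidlt hj hle)
    · rw [pvBlLoop_stop keys x lo hi hlt]
      exact ⟨h1, fun j hj hle => h2 j hj (by omega)⟩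

lemma pvBrLoop_spec (keys : List Int) (x : Int) (hpw : keys.Pairwise (· ≤ ·)) :
    ∀ (d lo hi : Nat), hi - lo ≤ d → hi ≤ keys.length →
      (∀ (j : Nat) (hj : j < keys.length), j < lo → keys[j] ≤ x) →
      (∀ (j : Nat) (hj : j < keys.length), hi ≤ j → x < keys[j]) →
      (∀ (j : Nat) (hj : j < keys.length), j < pvBrLoop keys x lo hi → keys[j] ≤ x) ∧
      (∀ (j : Nat) (hj : j < keys.length), pvBrLoop keys x lo hi ≤ j → x < keys[j]) := by
  have hmono : ∀ (i j : Nat) (hi' : i < keys.length) (hj' : j < keys.length), i ≤ j →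
      keys[i] ≤ keys[j] := by
    intro i j hi' hj' hij
    rcases Nat.lt_or_ge i j with h | h
    · exact List.pairwise_iff_getElem.mp hpw i j hi' hj' h
    · have : i = j := by omega
      subst this; exact le_rfl
  intro d
  induction d with
  | zero =>
    intro lo hi hd hlen h1 h2
    rw [pvBrLoop_stop keys x lo hi (by omega)]
    exact ⟨h1, fun j hj hle => h2 j hj (by omega)⟩
  | succ d ih =>
    intro lo hi hd hlen h1 h2
    by_cases hlt : lo < hi
    · rw [pvBrLoop_step keys x lo hi hlt]
      have hmidlt : (lo + hi) / 2 < keys.length := by omega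
      rw [List.getD_eq_getElem keys 0 hmidlt]
      by_cases hcase : x < keys[(lo + hi) / 2]
      · rw [if_pos hcase]
        apply ih lo ((lo + hi) / 2) (by omega) (by omega) h1
        intro j hj hle
        exact lt_of_lt_of_le hcase (hmono ((lo + hi) / 2) j hmidlt hj hle)
      · rw [if_neg hcase]
        apply ih ((lo + hi) / 2 + 1) hi (by omega) hlen
        · intro j hj hjlt
          have hle : j ≤ (lo + hi) / 2 := by omega
          exact le_trans (hmono j ((lo + hi) / 2) hj hmidlt hle) (not_lt.mp hcase)
        · exact h2
    · rw [pvBrLoop_stop keys x lo hi hlt]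
      exact ⟨h1, fun j hj hle => h2 j hj (by omega)⟩

lemma pvBisectLeft_spec (keys : List Int) (x : Int) (hpw : keys.Pairwise (· ≤ ·)) :
    (∀ (j : Nat) (hj : j < keys.length), j < pvBisectLeft keys x → keys[j] < x) ∧
    (∀ (j : Nat) (hj : j < keys.length), pvBisectLeft keys x ≤ j → x ≤ keys[j]) := by
  exact pvBlLoop_spec keys x hpw keys.length 0 keys.length (by omega) le_rfl
    (by intro j hj h; omega) (by intro j hj h; omega)

lemma pvBisectRight_spec (keys : List Int) (x : Int) (hpw : keys.Pairwise (· ≤ ·)) :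
    (∀ (j : Nat) (hj : j < keys.length), j < pvBisectRight keys x → keys[j] ≤ x) ∧
    (∀ (j : Nat) (hj : j < keys.length), pvBisectRight keys x ≤ j → x < keys[j]) := by
  exact pvBrLoop_spec keys x hpw keys.length 0 keys.length (by omega) le_rfl
    (by intro j hj h; omega) (by intro j hj h; omega)

lemma pv_stepA (t : Int) (b a : Int × Int × Int × Int) (c : Int) :
    (if |a.1 - b.1| > t then c
     else if |a.2.1 - b.2.1| > t then c
     else if |a.2.2.1 - b.2.2.1| > t then c
     else if |a.2.2.2 - b.2.2.2| > t then c
     else c + 1)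
      = c + if pvFull t b a then 1 else 0 := by
  by_cases h1 : |a.1 - b.1| ≤ t
  · rw [if_neg (not_lt.mpr h1)]
    by_cases h2 : |a.2.1 - b.2.1| ≤ t
    · rw [if_neg (not_lt.mpr h2)]
      by_cases h3 : |a.2.2.1 - b.2.2.1| ≤ t
      · rw [if_neg (not_lt.mpr h3)]
        by_cases h4 : |a.2.2.2 - b.2.2.2| ≤ t
        · rw [if_neg (not_lt.mpr h4)]
          simp [pvFull, pvRest, h1, h2, h3, h4]
        · rw [if_pos (not_le.mp h4)]
          simp [pvFull, pvRest, h4]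
      · rw [if_pos (not_le.mp h3)]
        simp [pvFull, pvRest, h3]
    · rw [if_pos (not_le.mp h2)]
      simp [pvFull, pvRest, h2]
  · rw [if_pos (not_le.mp h1)]
    simp [pvFull, pvRest, h1]

lemma pv_stepB (t : Int) (b a : Int × Int × Int × Int) (c : Int) :
    (if |a.2.1 - b.2.1| ≤ t ∧ |a.2.2.1 - b.2.2.1| ≤ t ∧ |a.2.2.2 - b.2.2.2| ≤ t then c + 1 else c)
      = c + if pvRest t b a then 1 else 0 := by
  by_cases h1 : |a.2.1 - b.2.1| ≤ t <;> by_cases h2 : |a.2.2.1 - b.2.2.1| ≤ t <;>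
    by_cases h3 : |a.2.2.2 - b.2.2.2| ≤ t <;> simp [pvRest, h1, h2, h3]

-- A's inner loop counts the full matches
lemma pv_foldlA (t : Int) (b : Int × Int × Int × Int) :
    ∀ (lbs : List (Int × Int × Int × Int)) (c : Int),
      lbs.foldl (fun c lb =>
        if |lb.1 - b.1| > t then c
        else if |lb.2.1 - b.2.1| > t then c
        else if |lb.2.2.1 - b.2.2.1| > t then c
        else if |lb.2.2.2 - b.2.2.2| > t then c
        else c + 1) c = c + (lbs.countP (pvFull t b) : Int) := by
  intro lbs
  induction lbs with
  | nil => intro c; simp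
  | cons a l ih =>
    intro c
    rw [List.foldl_cons, ih, pv_stepA, List.countP_cons]
    by_cases hf : pvFull t b a
    · simp [hf]; ring
    · simp [hf]

-- B's inner loop counts the rest-matches in the window
lemma pv_foldlB (t : Int) (b : Int × Int × Int × Int) :
    ∀ (ms : List (Int × Int × Int × Int)) (c : Int),
      ms.foldl (fun c lb =>
        if |lb.2.1 - b.2.1| ≤ t ∧ |lb.2.2.1 - b.2.2.1| ≤ t ∧ |lb.2.2.2 - b.2.2.2| ≤ t then c + 1
        else c) c = c + (ms.countP (pvRest t b) : Int) := by
  intro ms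
  induction ms with
  | nil => intro c; simp
  | cons a l ih =>
    intro c
    rw [List.foldl_cons, ih, pv_stepB, List.countP_cons]
    by_cases hf : pvRest t b a
    · simp [hf]; ring
    · simp [hf]

-- core: on a list sorted by x, the bisected window counts exactly the full matches
lemma pv_count_window (t : Int) (b : Int × Int × Int × Int) (L : List (Int × Int × Int × Int))
    (hpw : (L.map (fun l => l.1)).Pairwise (· ≤ ·)) :
    ((L.drop (pvBisectLeft (L.map (fun l => l.1)) (b.1 - t))).take
        (pvBisectRight (L.map (fun l => l.1)) (b.1 + t) - pvBisectLeft (L.map (fun l => l.1)) (b.1 - t))).countP (pvRest t b)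
      = L.countP (pvFull t b) := by
  obtain ⟨hl1, hl2⟩ := pvBisectLeft_spec (L.map (fun l => l.1)) (b.1 - t) hpw
  obtain ⟨hr1, hr2⟩ := pvBisectRight_spec (L.map (fun l => l.1)) (b.1 + t) hpw
  set lo := pvBisectLeft (L.map (fun l => l.1)) (b.1 - t) with hlo
  set hi := pvBisectRight (L.map (fun l => l.1)) (b.1 + t) with hhi
  have hlen : (L.map (fun l => l.1)).length = L.length := by simp
  have hkj : ∀ (j : Nat) (hj : j < L.length), (L.map (fun l => l.1))[j]'(by omega) = (L[j]).1 := by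
    intro j hj; simp
  have hdecomp : L.countP (pvFull t b)
      = (L.take lo).countP (pvFull t b)
        + (((L.drop lo).take (hi - lo)).countP (pvFull t b)
           + (((L.drop lo).drop (hi - lo)).countP (pvFull t b))) := by
    conv_lhs => rw [← List.take_append_drop lo L, ← List.take_append_drop (hi - lo) (L.drop lo)]
    rw [List.countP_append, List.countP_append]
  have h1 : (L.take lo).countP (pvFull t b) = 0 := by
    rw [List.countP_eq_zero]
    intro a ha
    obtain ⟨j, hj, rfl⟩ := List.mem_iff_getElem.mp ha
    have hjlen : j < L.length := by
      have := hj; simp [List.length_take] at this; omega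
    have hjlo : j < lo := by
      have := hj; simp [List.length_take] at this; omega
    have hkey := hl1 j (by omega) hjlo
    rw [hkj j hjlen] at hkey
    simp only [List.getElem_take, pvFull, Bool.and_eq_true, decide_eq_true_eq]
    intro habs
    have := abs_le.mp habs.1
    omega
  have h3 : ((L.drop lo).drop (hi - lo)).countP (pvFull t b) = 0 := by
    rw [List.countP_eq_zero]
    intro a ha
    obtain ⟨j, hj, rfl⟩ := List.mem_iff_getElem.mp ha
    have hjlen : (hi - lo) + (lo + j) < L.length := by
      have := hj; simp [List.length_drop] at this; omega
    have hge : hi ≤ lo + ((hi - lo) + j) := by omega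
    have hkey := hr2 (lo + ((hi - lo) + j)) (by omega) hge
    rw [hkj (lo + ((hi - lo) + j)) (by omega)] at hkey
    simp only [List.getElem_drop, pvFull, Bool.and_eq_true, decide_eq_true_eq]
    intro habs
    have := abs_le.mp habs.1
    omega
  have h2 : ((L.drop lo).take (hi - lo)).countP (pvFull t b)
      = ((L.drop lo).take (hi - lo)).countP (pvRest t b) := by
    apply List.countP_congr
    intro a ha
    obtain ⟨j, hj, rfl⟩ := List.mem_iff_getElem.mp ha
    have hjlt : j < hi - lo := by
      have := hj; simp [List.length_take] at this; omega
    have hjlen : lo + j < L.length := by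
      have := hj; simp [List.length_take, List.length_drop] at this; omega
    have hge := hl2 (lo + j) (by omega) (by omega)
    have hlt := hr1 (lo + j) (by omega) (by omega)
    rw [hkj (lo + j) hjlen] at hge hlt
    have habs : |(L[lo + j]).1 - b.1| ≤ t := abs_le.mpr (by omega)
    simp only [List.getElem_take, List.getElem_drop, pvFull, habs, decide_true, Bool.true_and]
  rw [hdecomp, h1, h2, h3]
  omega

lemma pv_main (lbs : List (Int × Int × Int × Int)) (t : Int) :
    ∀ (inf : List (Int × Int × Int × Int)) (c : Int),
      inf.foldl (fun count bbox =>
        lbs.foldl (fun c lb =>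
          if |lb.1 - bbox.1| > t then c
          else if |lb.2.1 - bbox.2.1| > t then c
          else if |lb.2.2.1 - bbox.2.2.1| > t then c
          else if |lb.2.2.2 - bbox.2.2.2| > t then c
          else c + 1) count) c
      = inf.foldl (fun count bbox =>
          (PySem.List.slice (PySem.List.sorted lbs (fun b => b.1) false)
              (some ((pvBisectLeft ((PySem.List.sorted lbs (fun b => b.1) false).map (fun b => b.1)) (bbox.1 - t) : Nat) : Int))
              (some ((pvBisectRight ((PySem.List.sorted lbs (fun b => b.1) false).map (fun b => b.1)) (bbox.1 + t) : Nat) : Int))).foldl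
            (fun c lb =>
              if |lb.2.1 - bbox.2.1| ≤ t ∧ |lb.2.2.1 - bbox.2.2.1| ≤ t ∧ |lb.2.2.2 - bbox.2.2.2| ≤ t then c + 1
              else c) count) c := by
  intro inf
  induction inf with
  | nil => intro c; rfl
  | cons b inf ih =>
    intro c
    rw [List.foldl_cons, List.foldl_cons, ih]
    congr 1
    rw [pv_foldlA t b lbs c]
    rw [PySem.List.slice_natCast]
    rw [pv_foldlB t b _ c]
    rw [pv_count_window t b (PySem.List.sorted lbs (fun b => b.1) false)
          (PySem.List.sorted_map_key_pairwise lbs (fun b => b.1))]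
    rw [List.Perm.countP_eq _ (PySem.List.sorted_perm lbs (fun b => b.1) false)]

-- ===== VERDICT (by name: the statement is the Claim_ definition above) =====
theorem match_bboxs_spec : Claim_equal_match_bboxs := by
  intro label_bboxs infer_bboxs thres _
  exact pv_main label_bboxs thres infer_bboxs 0
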